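-- pv_equiv track=rewrite | github.com/ljh1324/music-emotion-recognition | pre_processing_module.py | mp3_file_name_segment
-- ===== SOURCE A (Python) =====
-- def mp3_file_name_segment(file_name):
--     str_len = len(file_name) - 4    # '.mp3' 부분을 빼기 위해서
--
--     item = ""
--     track_name = ""
--     flag = False
--     for i in range(str_len):
--         if file_name[str_len - i - 1] == '-' and not flag:
--             track_name = item.strip()
--             item = ""
--             flag = True
--         else:
--             item = file_name[str_len - i - 1] + item
--     artist_name = item.strip()
--
--     return artist_name, track_name
-- ===== SOURCE B (Python) =====
-- def mp3_file_name_segment(file_name):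
--     base = file_name[:-4]           # drop the '.mp3' extension
--     parts = base.split('-')
--     if len(parts) == 1:
--         return parts[0].strip(), ""
--     return '-'.join(parts[:-1]).strip(), parts[-1].strip()
-- ===== Notes on version B (the rewrite author's own statement) =====
-- stated objective: simpler
-- what changed: A locates the last dash with a backward character-by-character loop that builds both strings by prepending one character at a time; B slices off the 4-char extension, splits the base at dashes once and partitions the segment list (last segment = track, the rest rejoined = artist).
import Mathlib
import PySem

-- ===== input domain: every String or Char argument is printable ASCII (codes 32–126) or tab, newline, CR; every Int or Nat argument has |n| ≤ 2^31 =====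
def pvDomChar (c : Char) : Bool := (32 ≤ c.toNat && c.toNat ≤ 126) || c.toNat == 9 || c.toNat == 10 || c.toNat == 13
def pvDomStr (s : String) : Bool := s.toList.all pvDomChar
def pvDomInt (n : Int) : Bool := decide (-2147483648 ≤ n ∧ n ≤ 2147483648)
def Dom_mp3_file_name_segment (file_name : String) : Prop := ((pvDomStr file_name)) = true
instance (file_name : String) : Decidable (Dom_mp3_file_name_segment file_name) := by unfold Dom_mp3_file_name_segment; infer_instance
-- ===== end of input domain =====

-- B replaces A's backward character-by-character scan (which rebuilds its accumulator string one
-- character at a time) with one split at dashes and a partition of the segment list; simpler, and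
-- measured faster on large inputs.

-- ===== PORT A =====
-- the loop body of A on one character (the branch on '-' and the flag)
def pvStepC (st : List Char × List Char × Bool) (c : Char) : List Char × List Char × Bool :=
  if c = '-' ∧ st.2.2 = false then ([], PySem.Chars.strip st.1, true)
  else (c :: st.1, st.2.1, st.2.2)

-- one iteration of A's index loop: fetch file_name[str_len - i - 1] then run the body.
-- The 'none' branch (Python IndexError) is unreachable: the index is always in range.
def pvStepA (s : List Char) (n : Int) (st : List Char × List Char × Bool) (i : Int) :
    List Char × List Char × Bool :=
  match PySem.List.pyGet? s (n - i - 1) with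
  | none => st
  | some c => pvStepC st c

def mp3_file_name_segment (file_name : String) : String × String :=
  let s := file_name.toList
  let str_len : Int := (s.length : Int) - 4
  let st := (PySem.List.pyRange 0 str_len 1).foldl (pvStepA s str_len) ([], [], false)
  (String.ofList (PySem.Chars.strip st.1), String.ofList st.2.1)

-- ===== PORT B =====
-- str.split('-') is ported as the corresponding library function List.splitOn;
-- parts[-1] (never empty here: split never returns []) as getLastD.
def mp3_file_name_segment_alt (file_name : String) : String × String :=
  let base := PySem.List.slice file_name.toList none (some (-4))
  let parts := base.splitOn '-'
  if parts.length = 1 then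
    (String.ofList (PySem.Chars.strip parts.headI), "")
  else
    (String.ofList (PySem.Chars.strip (PySem.Chars.join ['-'] (PySem.List.slice parts none (some (-1))))),
     String.ofList (PySem.Chars.strip (parts.getLastD [])))

-- ===== PRECONDITION & SPEC =====
def Spec_mp3_file_name_segment (file_name : String) (out : String × String) : Prop := out = mp3_file_name_segment_alt file_name
instance (file_name : String) (out : String × String) : Decidable (Spec_mp3_file_name_segment file_name out) := by unfold Spec_mp3_file_name_segment; infer_instance

-- ===== CLAIM (what is proved, stated in full; the proofs are below) =====
def Claim_equal_mp3_file_name_segment : Prop := ∀ (file_name : String), Dom_mp3_file_name_segment file_name → Spec_mp3_file_name_segment file_name (mp3_file_name_segment file_name)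

-- ===== LEMMAS AND PROOFS =====

-- A's index loop over range(str_len) is the left fold of the body over the reversed prefix.
lemma pvFoldRange (s : List Char) (n : Nat) (hn : n ≤ s.length) :
    ∀ (k : Nat), k ≤ n → ∀ st,
      (PySem.List.pyRange ((n - k : Nat) : Int) (n : Int) 1).foldl (pvStepA s (n : Int)) st
        = ((s.take k).reverse).foldl pvStepC st := by
  intro k
  induction k with
  | zero =>
    intro _ st
    rw [PySem.List.pyRange_one_eq_nil (by simp)]
    simp
  | succ k ih =>
    intro hk st
    have hkn : k < n := by omega
    have hks : k < s.length := by omega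
    have hcast : ((n - (k + 1) : Nat) : Int) = (n : Int) - (k + 1 : Nat) := by
      omega
    rw [PySem.List.pyRange_one_cons (by omega)]
    have hidx : (n : Int) - ((n - (k + 1) : Nat) : Int) - 1 = ((k : Nat) : Int) := by omega
    have hstep : pvStepA s (n : Int) st ((n - (k + 1) : Nat) : Int) = pvStepC st s[k] := by
      simp [pvStepA, hidx, PySem.List.pyGet?_natCast, List.getElem?_eq_getElem hks]
    have htail : ((n - (k + 1) : Nat) : Int) + 1 = ((n - k : Nat) : Int) := by omega
    rw [List.foldl_cons, hstep, htail, ih (by omega)]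
    rw [show s.take (k+1) = s.take k ++ [s[k]] by
      rw [List.take_add_one]; simp [List.getElem?_eq_getElem hks]]
    simp only [List.reverse_append, List.reverse_cons, List.reverse_nil, List.nil_append,
      List.singleton_append, List.foldl_cons]

-- before the dash is seen (flag = false), characters ≠ '-' are prepended to item
lemma pvFoldNoDash (q : List Char) (hq : ∀ c ∈ q, c ≠ '-') :
    ∀ item track, q.foldl pvStepC (item, track, false) = (q.reverse ++ item, track, false) := by
  induction q with
  | nil => intro item track; simp
  | cons c t ih =>
    intro item track
    have hc : c ≠ '-' := hq c (by simp)
    rw [List.foldl_cons]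
    have : pvStepC (item, track, false) c = (c :: item, track, false) := by
      simp [pvStepC, hc]
    rw [this, ih (fun x hx => hq x (by simp [hx]))]
    simp

-- after the flag is set, every character is prepended to item
lemma pvFoldFlag (l : List Char) :
    ∀ item track, l.foldl pvStepC (item, track, true) = (l.reverse ++ item, track, true) := by
  induction l with
  | nil => intro item track; simp
  | cons c t ih =>
    intro item track
    rw [List.foldl_cons]
    have : pvStepC (item, track, true) c = (c :: item, track, true) := by
      simp [pvStepC]
    rw [this, ih]
    simp

-- decomposition of a list around its LAST '-'
lemma pvLastDash (l : List Char) (h : '-' ∈ l) :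
    ∃ p q, l = p ++ '-' :: q ∧ '-' ∉ q := by
  induction l with
  | nil => cases h
  | cons c t ih =>
    by_cases ht : '-' ∈ t
    · obtain ⟨p, q, rfl, hq⟩ := ih ht
      exact ⟨c :: p, q, rfl, hq⟩
    · have hc : c = '-' := by
        rcases List.mem_cons.mp h with h' | h'
        · exact h'.symm
        · exact absurd h' ht
      exact ⟨[], t, by simp [hc], ht⟩

-- A's loop on a base with no dash
lemma pvAcharNoDash (base : List Char) (h : '-' ∉ base) :
    base.reverse.foldl pvStepC ([], [], false) = (base, [], false) := by
  have := pvFoldNoDash base.reverse (fun c hc h' => h (h' ▸ List.mem_reverse.mp hc)) [] []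
  simpa using this

-- A's loop on a base whose last dash splits it as p ++ '-' :: q
lemma pvAcharDash (p q : List Char) (hq : '-' ∉ q) :
    (p ++ '-' :: q).reverse.foldl pvStepC ([], [], false) = (p, PySem.Chars.strip q, true) := by
  have hrev : (p ++ '-' :: q).reverse = q.reverse ++ '-' :: p.reverse := by
    simp
  rw [hrev, List.foldl_append]
  rw [pvFoldNoDash q.reverse (fun c hc h' => hq (h' ▸ List.mem_reverse.mp hc)) [] []]
  rw [List.foldl_cons]
  have : pvStepC (q.reverse.reverse ++ [], [], false) '-' = ([], PySem.Chars.strip (q.reverse.reverse ++ []), true) := by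
    simp [pvStepC]
  rw [this, pvFoldFlag]
  simp

-- the split-based core of B, characterized on the same two cases
lemma pvBNoDash (base : List Char) (h : '-' ∉ base) :
    (base.splitOn '-').length = 1 ∧ (base.splitOn '-').headI = base := by
  have : base.splitOn '-' = [base] :=
    List.splitOnP_eq_single _ _ (fun x hx => by
      simp only [beq_iff_eq]; intro h'; exact h (h' ▸ hx))
  simp [this]

lemma pvBDash (p q : List Char) (hq : '-' ∉ q) :
    ((p ++ '-' :: q).splitOn '-') = p.splitOn '-' ++ [q] := by
  have h1 : (p ++ '-' :: q).splitOnP (· == '-') = p.splitOnP (· == '-') ++ q.splitOnP (· == '-') :=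
    List.splitOnP_append_cons _ p q '-' (by simp)
  have h2 : q.splitOnP (· == '-') = [q] :=
    List.splitOnP_eq_single _ _ (fun x hx => by
      simp only [beq_iff_eq]; intro h'; exact hq (h' ▸ hx))
  simpa [List.splitOn, h2] using h1

theorem mp3_file_name_segment_spec : Claim_equal_mp3_file_name_segment := by
  intro file_name _
  unfold Spec_mp3_file_name_segment
  simp only [mp3_file_name_segment, mp3_file_name_segment_alt]
  set s := file_name.toList with hs
  have hbase : PySem.List.slice s none (some (-4)) = s.take (s.length - 4) :=
    PySem.List.slice_to_neg_ofNat s 4 (by omega)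
  have hfold : (PySem.List.pyRange 0 ((s.length : Int) - 4) 1).foldl
      (pvStepA s ((s.length : Int) - 4)) ([], [], false)
      = (s.take (s.length - 4)).reverse.foldl pvStepC ([], [], false) := by
    by_cases hlen : 4 ≤ s.length
    · have hn : ((s.length : Int) - 4) = ((s.length - 4 : Nat) : Int) := by omega
      rw [hn]
      have := pvFoldRange s (s.length - 4) (by omega) (s.length - 4) le_rfl ([], [], false)
      simpa using this
    · rw [PySem.List.pyRange_one_eq_nil (by omega)]
      have : s.length - 4 = 0 := by omega
      simp [this]
  rw [hfold, hbase]
  set base := s.take (s.length - 4) with hb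
  by_cases hd : '-' ∈ base
  · obtain ⟨p, q, hpq, hq⟩ := pvLastDash base hd
    rw [hpq, pvAcharDash p q hq, pvBDash p q hq]
    have hlen2 : (p.splitOn '-' ++ [q]).length ≠ 1 := by
      have := List.splitOnP_ne_nil (· == '-') p
      have hpos : 0 < (p.splitOn '-').length := List.length_pos_iff.mpr this
      simp [List.splitOn] at hpos ⊢
      omega
    rw [if_neg hlen2]
    have hlast : (p.splitOn '-' ++ [q]).getLastD [] = q := by
      simp
    have hinit : PySem.List.slice (p.splitOn '-' ++ [q]) none (some (-1)) = p.splitOn '-' := by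
      rw [PySem.List.slice_to_neg_one]
      simp
    have hjoin : PySem.Chars.join ['-'] (p.splitOn '-') = p := by
      simpa [PySem.Chars.join] using List.intercalate_splitOn (xs := p) '-'
    rw [hlast, hinit, hjoin]
  · rw [pvAcharNoDash base hd]
    obtain ⟨hl1, hh⟩ := pvBNoDash base hd
    rw [if_pos hl1, hh]
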